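-- pv_equiv track=rewrite | github.com/SabastianGu/Dockerized_websocket | test_project/WebService/engine_side/consumers.py | calculate_perfect_number
-- ===== SOURCE A (Python) =====
-- def calculate_perfect_number(number):
--     if number <= 0:
--         raise ValueError("Number must be positive")
--
--     factors = [i for i in range(1, number) if number % i == 0]
--     if sum(factors) == number:
--         return number, f"{number} is a perfect number"
--
--     i = 1
--     while True:
--         candidate = number + i
--         factors = [j for j in range(1, candidate) if candidate % j == 0]
--         if sum(factors) == candidate:
--             return candidate, f"{number} is not a perfect number, but the nearest perfect number is {candidate}"
--         i += 1
-- ===== SOURCE B (Python) =====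
-- def _proper_divisor_sum(n):
--     # sum of proper divisors via paired divisors up to sqrt(n)
--     if n == 1:
--         return 0
--     total = 1
--     d = 2
--     while d * d <= n:
--         if n % d == 0:
--             total += d
--             q = n // d
--             if q != d:
--                 total += q
--         d += 1
--     return total
--
--
-- def calculate_perfect_number(number):
--     if number <= 0:
--         raise ValueError("Number must be positive")
--
--     candidate = number
--     while _proper_divisor_sum(candidate) != candidate:
--         candidate += 1
--
--     if candidate == number:
--         return number, f"{number} is a perfect number"
--     return candidate, f"{number} is not a perfect number, but the nearest perfect number is {candidate}"
-- ===== Notes on version B (the rewrite author's own statement) =====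
-- stated objective: faster
-- what changed: B computes each candidate's proper-divisor sum by pairing divisors up to sqrt(candidate) instead of trial-dividing by every i below the candidate, and scans candidates starting at the number itself instead of a separate pre-check plus offset loop; intended as faster per candidate (measured 61x at the largest input size where both finished; both searches still take long when the nearest perfect number is far away).
-- outside the precondition, e.g. on calculate_perfect_number(0): A raises ValueError, B raises ValueError
import Mathlib
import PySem

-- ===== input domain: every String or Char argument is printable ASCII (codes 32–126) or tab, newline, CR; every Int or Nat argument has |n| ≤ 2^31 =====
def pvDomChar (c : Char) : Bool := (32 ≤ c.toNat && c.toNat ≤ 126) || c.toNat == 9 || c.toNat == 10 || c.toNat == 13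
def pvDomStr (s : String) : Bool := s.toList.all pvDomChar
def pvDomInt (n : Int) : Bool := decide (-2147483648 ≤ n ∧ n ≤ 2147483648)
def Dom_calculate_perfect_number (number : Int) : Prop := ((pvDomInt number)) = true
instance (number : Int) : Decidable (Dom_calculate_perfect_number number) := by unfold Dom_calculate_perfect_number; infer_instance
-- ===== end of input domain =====

-- B replaces A's per-candidate trial division by every smaller i with divisor pairing up to
-- sqrt(candidate) (intended as faster; a timing run measured 61x at the largest size where
-- both finished, while both still time out when the nearest perfect number is very far).
-- Return values are proved identical on Pre_.
-- Both loops are ported with the same large fuel constant (the Python 'while True' loops); on fuel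
-- exhaustion (unreachable for any input on which Python returns in practice) both ports give (0, "").

-- ===== PORT A =====
-- fuel bound shared by both ports for the unbounded 'while True' search
def pvFuel : Nat := 17179869184

-- factors = [i for i in range(1, n) if n % i == 0]
def pvFactorsA (n : Int) : List Int :=
  (PySem.List.pyRange 1 n 1).filter (fun i => PySem.Int.mod n i == 0)

def pvLoopA (number : Int) (i : Int) : Nat → Int × String
  | 0 => (0, "")
  | fuel+1 =>
    let candidate := number + i
    let factors := pvFactorsA candidate
    if factors.sum = candidate then
      (candidate, PySem.Int.toStr number ++ " is not a perfect number, but the nearest perfect number is " ++ PySem.Int.toStr candidate)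
    else pvLoopA number (i+1) fuel

def calculate_perfect_number (number : Int) : Int × String :=
  if number ≤ 0 then (0, "")   -- Python raises ValueError here; excluded by Pre_
  else
    let factors := pvFactorsA number
    if factors.sum = number then (number, PySem.Int.toStr number ++ " is a perfect number")
    else pvLoopA number 1 pvFuel

-- ===== PORT B =====
-- while d*d <= n: pair up divisors d and n//d
def pvDivLoopB (n : Nat) (d : Nat) (total : Nat) : Nat :=
  if h : d * d ≤ n then
    pvDivLoopB n (d + 1)
      (if n % d = 0 then total + d + (if n / d ≠ d then n / d else 0) else total)
  else total
termination_by n + 1 - d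
decreasing_by
  have hd : d ≤ n := by
    rcases Nat.eq_zero_or_pos d with h0 | h0
    · omega
    · exact le_trans (Nat.le_mul_of_pos_left d h0) h
  omega

def pvProperSum (n : Nat) : Nat :=
  if n = 1 then 0 else pvDivLoopB n 2 1

def pvFindB (c : Nat) : Nat → Option Nat
  | 0 => none
  | fuel+1 => if pvProperSum c = c then some c else pvFindB (c + 1) fuel

def calculate_perfect_number_alt (number : Int) : Int × String :=
  if number ≤ 0 then (0, "")   -- Python raises ValueError here; excluded by Pre_
  else
    let n := number.toNat
    match pvFindB n (pvFuel + 1) with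
    | some cand =>
      if cand = n then (number, PySem.Int.toStr number ++ " is a perfect number")
      else ((cand : Int), PySem.Int.toStr number ++ " is not a perfect number, but the nearest perfect number is " ++ PySem.Int.toStr (cand : Int))
    | none => (0, "")

-- ===== PRECONDITION & SPEC =====
-- Python A raises ValueError exactly when number <= 0; Pre_ excludes precisely those inputs.
def Pre_calculate_perfect_number (number : Int) : Prop := 1 ≤ number
instance (number : Int) : Decidable (Pre_calculate_perfect_number number) := by
  unfold Pre_calculate_perfect_number; infer_instance

def pvWitness_calculate_perfect_number : Int := 6

def Spec_calculate_perfect_number (number : Int) (out : Int × String) : Prop := out = calculate_perfect_number_alt number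
instance (number : Int) (out : Int × String) : Decidable (Spec_calculate_perfect_number number out) := by unfold Spec_calculate_perfect_number; infer_instance

-- ===== CLAIM (what is proved, stated in full; the proofs are below) =====
def Claim_equal_calculate_perfect_number : Prop := ∀ (number : Int), Dom_calculate_perfect_number number → Pre_calculate_perfect_number number → Spec_calculate_perfect_number number (calculate_perfect_number number)

-- ===== LEMMAS AND PROOFS =====

-- A-side: the filtered range sum is the sum of proper divisors (as a Finset.range indicator sum).
theorem pvFactorsA_sum_eq (c : Nat) :
    ∀ n : Nat, ((PySem.List.pyRange 1 (n : Int) 1).filter (fun i => PySem.Int.mod (c : Int) i == 0)).sum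
      = ((∑ k ∈ Finset.range n, if k ∣ c ∧ k ≠ 0 then k else 0 : Nat) : Int) := by
  intro n
  induction n with
  | zero => simp [PySem.List.pyRange_one_eq_nil]
  | succ n ih =>
    rcases Nat.eq_zero_or_pos n with h0 | h0
    · subst h0
      simp [PySem.List.pyRange_one_eq_nil]
    · have hcast : ((n + 1 : Nat) : Int) = (n : Int) + 1 := by push_cast; ring
      rw [hcast, PySem.List.pyRange_one_succ_right (by exact_mod_cast h0),
        List.filter_append, List.sum_append, ih, Finset.sum_range_succ]
      have hn0 : n ≠ 0 := by omega
      have hcond : ((PySem.Int.mod (c : Int) (n : Int)) == 0) = decide (n ∣ c) := by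
        by_cases hd : n ∣ c <;> simp [hd, Int.natCast_dvd_natCast]
      by_cases hdvd : n ∣ c
      · rw [if_pos ⟨hdvd, hn0⟩]
        have hb : ((c : Int) % (n : Int) == 0) = true := by
          simp [Int.natCast_dvd_natCast, hdvd]
        simp [List.filter, hb]
      · rw [if_neg (fun h => hdvd h.1)]
        have hb : ((c : Int) % (n : Int) == 0) = false := by
          simp [Int.natCast_dvd_natCast, hdvd]
        simp [List.filter, hb]

theorem sum_range_eq_properDivisors (c : Nat) (hc : 1 ≤ c) :
    (∑ k ∈ Finset.range c, if k ∣ c ∧ k ≠ 0 then k else 0) = ∑ k ∈ c.properDivisors, k := by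
  have hsub : c.properDivisors ⊆ Finset.range c := by
    intro k hk
    rw [Nat.mem_properDivisors] at hk
    exact Finset.mem_range.mpr hk.2
  rw [← Finset.sum_subset hsub]
  · apply Finset.sum_congr rfl
    intro k hk
    rw [Nat.mem_properDivisors] at hk
    have hk0 : k ≠ 0 := by
      rintro rfl
      exact absurd (Nat.eq_zero_of_zero_dvd hk.1) (by omega)
    simp [hk.1, hk0]
  · intro k hk hnk
    rw [Finset.mem_range] at hk
    rw [Nat.mem_properDivisors] at hnk
    have : ¬ (k ∣ c) := fun h => hnk ⟨h, hk⟩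
    simp [this]

-- The contribution of iteration d of B's loop, summed over all divisors of c.
def pvF (c d k : Nat) : Nat :=
  if d ≤ k ∧ k * k ≤ c then k + (if c / k ≠ k then c / k else 0) else 0

theorem pvF_succ_of_ne (c d k : Nat) (hne : k ≠ d) : pvF c d k = pvF c (d + 1) k := by
  unfold pvF
  by_cases hb : k * k ≤ c
  · by_cases ha : d ≤ k
    · rw [if_pos (show d + 1 ≤ k ∧ k * k ≤ c from ⟨by omega, hb⟩),
          if_pos (show d ≤ k ∧ k * k ≤ c from ⟨ha, hb⟩)]
    · rw [if_neg (fun h => ha h.1), if_neg (fun h => ha (le_trans (Nat.le_succ d) h.1))]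
  · rw [if_neg (fun h => hb h.2), if_neg (fun h => hb h.2)]

theorem pvDivLoopB_invariant (c : Nat) (hc : 2 ≤ c) :
    ∀ m d t, c + 1 ≤ d + m → pvDivLoopB c d t = t + ∑ k ∈ c.divisors, pvF c d k := by
  intro m
  induction m with
  | zero =>
    intro d t hm
    have hdd : ¬ d * d ≤ c := by
      have : d ≤ d * d := Nat.le_mul_of_pos_left d (by omega)
      omega
    rw [pvDivLoopB, dif_neg hdd]
    have : ∑ k ∈ c.divisors, pvF c d k = 0 := by
      apply Finset.sum_eq_zero
      intro k hk
      rw [Nat.mem_divisors] at hk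
      have : k ≤ c := Nat.le_of_dvd (by omega) hk.1
      unfold pvF
      rw [if_neg (by omega)]
    omega
  | succ m ih =>
    intro d t hm
    rw [pvDivLoopB]
    by_cases hdd : d * d ≤ c
    · rw [dif_pos hdd, ih (d + 1) _ (by omega)]
      -- key step: peel off the k = d term
      have hstep : ∑ k ∈ c.divisors, pvF c d k
          = (if c % d = 0 then d + (if c / d ≠ d then c / d else 0) else 0)
            + ∑ k ∈ c.divisors, pvF c (d + 1) k := by
        by_cases hdvd : c % d = 0
        · have hd0 : d ≠ 0 := by
            rintro rfl
            simp at hdvd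
            omega
          have hdiv : d ∣ c := Nat.dvd_iff_mod_eq_zero.mpr hdvd
          have hdmem : d ∈ c.divisors := Nat.mem_divisors.mpr ⟨hdiv, by omega⟩
          rw [← Finset.add_sum_erase _ (pvF c d) hdmem,
              ← Finset.add_sum_erase _ (pvF c (d + 1)) hdmem]
          have h1 : pvF c d d = d + (if c / d ≠ d then c / d else 0) := by
            simp [pvF, hdd]
          have h2 : pvF c (d + 1) d = 0 := by
            unfold pvF
            rw [if_neg (by omega)]
          have h3 : ∑ k ∈ c.divisors.erase d, pvF c d k
              = ∑ k ∈ c.divisors.erase d, pvF c (d + 1) k := by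
            apply Finset.sum_congr rfl
            intro k hk
            exact pvF_succ_of_ne c d k (Finset.ne_of_mem_erase hk)
          rw [h1, h2, h3, if_pos hdvd]
          ring
        · have hnotmem : d ∉ c.divisors := by
            intro hmem
            rcases Nat.mem_divisors.mp hmem with ⟨hdiv, _⟩
            have hd0 : 0 < d := by
              rcases Nat.eq_zero_or_pos d with rfl | h
              · have := Nat.eq_zero_of_zero_dvd hdiv; omega
              · exact h
            exact hdvd (Nat.dvd_iff_mod_eq_zero.mp hdiv)
          rw [if_neg hdvd]
          have : ∑ k ∈ c.divisors, pvF c d k = ∑ k ∈ c.divisors, pvF c (d + 1) k := by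
            apply Finset.sum_congr rfl
            intro k hk
            exact pvF_succ_of_ne c d k (by rintro rfl; exact hnotmem hk)
          omega
      rw [hstep]
      by_cases hdvd : c % d = 0
      · rw [if_pos hdvd, if_pos hdvd]; ring
      · rw [if_neg hdvd, if_neg hdvd]; ring
    · rw [dif_neg hdd]
      have : ∑ k ∈ c.divisors, pvF c d k = 0 := by
        apply Finset.sum_eq_zero
        intro k hk
        unfold pvF
        rw [if_neg]
        rintro ⟨hk1, hk2⟩
        exact hdd (le_trans (Nat.mul_le_mul hk1 hk1) hk2)
      omega

-- The divisor-pairing identity: 1 + the loop's total contribution = sum of proper divisors.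
theorem pvPairing (c : Nat) (hc : 2 ≤ c) :
    1 + ∑ k ∈ c.divisors, pvF c 2 k = ∑ k ∈ c.properDivisors, k := by
  have hc0 : c ≠ 0 := by omega
  -- split pvF 2 into the small-divisor part and the paired large-divisor part
  have hsplit : ∑ k ∈ c.divisors, pvF c 2 k
      = (∑ k ∈ c.divisors, if 2 ≤ k ∧ k * k ≤ c then k else 0)
        + ∑ k ∈ c.divisors, (if 2 ≤ k ∧ k * k < c then c / k else 0) := by
    rw [← Finset.sum_add_distrib]
    apply Finset.sum_congr rfl
    intro k hk
    rcases Nat.mem_divisors.mp hk with ⟨hdvd, _⟩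
    have hk0 : 0 < k := by
      rcases Nat.eq_zero_or_pos k with rfl | h
      · have := Nat.eq_zero_of_zero_dvd hdvd; omega
      · exact h
    have hmul : k * (c / k) = c := Nat.mul_div_cancel' hdvd
    unfold pvF
    by_cases h1 : 2 ≤ k ∧ k * k ≤ c
    · have hiff : c / k ≠ k ↔ k * k < c := by
        constructor
        · intro hne
          rcases Nat.lt_or_ge (k * k) c with h | h
          · exact h
          · have heq : k * k = c := by omega
            exact absurd (by rw [← heq, Nat.mul_div_cancel_left _ hk0]) hne
        · intro hlt heq
          rw [heq] at hmul
          omega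
      rw [if_pos h1, if_pos h1]
      by_cases h2 : k * k < c
      · rw [if_pos (hiff.mpr h2), if_pos ⟨h1.1, h2⟩]
      · rw [if_neg (fun hne => h2 (hiff.mp hne)), if_neg (fun hx => h2 hx.2)]
    · rw [if_neg h1, if_neg h1, if_neg (fun hx => h1 ⟨hx.1, le_of_lt hx.2⟩)]
  -- reindex the paired part over k ↦ c / k
  have hre : ∑ k ∈ c.divisors, (if 2 ≤ k ∧ k * k < c then c / k else 0)
      = ∑ k ∈ c.divisors, (if c < k * k ∧ k ≠ c then k else 0) := by
    have hpt : ∀ k ∈ c.divisors,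
        (if 2 ≤ k ∧ k * k < c then c / k else 0)
          = (fun j => if c < j * j ∧ j ≠ c then j else 0) (c / k) := by
      intro k hk
      rcases Nat.mem_divisors.mp hk with ⟨hdvd, _⟩
      have hk0 : 0 < k := by
        rcases Nat.eq_zero_or_pos k with rfl | h
        · have := Nat.eq_zero_of_zero_dvd hdvd; omega
        · exact h
      have hmul : k * (c / k) = c := Nat.mul_div_cancel' hdvd
      have hq0 : 0 < c / k := by
        rcases Nat.eq_zero_or_pos (c / k) with h | h
        · rw [h, Nat.mul_zero] at hmul; omega
        · exact h
      have e1 : 2 ≤ k ↔ c / k ≠ c := by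
        constructor
        · intro h2 heq
          rw [heq] at hmul
          nlinarith
        · intro hne
          rcases Nat.lt_or_ge k 2 with h | h
          · have hk1 : k = 1 := by omega
            rw [hk1, Nat.div_one] at hne
            exact absurd rfl hne
          · exact h
      have e2 : k * k < c ↔ c < (c / k) * (c / k) := by
        constructor
        · intro h
          have hkq : k < c / k :=
            Nat.lt_of_mul_lt_mul_left (a := k) (by rw [hmul]; exact h)
          calc c = k * (c / k) := hmul.symm
            _ < (c / k) * (c / k) := Nat.mul_lt_mul_of_pos_right hkq hq0
        · intro h
          rcases Nat.lt_or_ge k (c / k) with hkq | hkq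
          · calc k * k < k * (c / k) := Nat.mul_lt_mul_of_pos_left hkq hk0
              _ = c := hmul
          · exfalso
            have : c / k * (c / k) ≤ k * (c / k) := Nat.mul_le_mul_right _ hkq
            rw [hmul] at this
            omega
      simp only
      by_cases h1 : 2 ≤ k ∧ k * k < c
      · rw [if_pos h1, if_pos ⟨e2.mp h1.2, e1.mp h1.1⟩]
      · rw [if_neg h1, if_neg]
        rintro ⟨ha, hb⟩
        exact h1 ⟨e1.mpr hb, e2.mpr ha⟩
    rw [Finset.sum_congr rfl hpt, Nat.sum_div_divisors c (fun j => if c < j * j ∧ j ≠ c then j else 0)]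
  -- merge the two indicator sums
  have hmerge : (∑ k ∈ c.divisors, if 2 ≤ k ∧ k * k ≤ c then k else 0)
      + (∑ k ∈ c.divisors, if c < k * k ∧ k ≠ c then k else 0)
      = ∑ k ∈ c.divisors, (if 2 ≤ k ∧ k ≠ c then k else 0) := by
    rw [← Finset.sum_add_distrib]
    apply Finset.sum_congr rfl
    intro k hk
    rcases Nat.mem_divisors.mp hk with ⟨hdvd, _⟩
    have hk0 : 0 < k := by
      rcases Nat.eq_zero_or_pos k with rfl | h
      · have := Nat.eq_zero_of_zero_dvd hdvd; omega
      · exact h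
    have hkc : k ≤ c := Nat.le_of_dvd (by omega) hdvd
    have h1 : k * k ≤ c → k ≠ c := by
      intro h heq
      subst heq
      nlinarith
    have h2 : c < k * k → 2 ≤ k := by
      intro h
      rcases Nat.lt_or_ge k 2 with hlt | hge
      · interval_cases k <;> omega
      · exact hge
    split_ifs <;> omega
  -- finally account for the divisor 1 and drop c itself
  have hone : (∑ k ∈ c.divisors, if 2 ≤ k ∧ k ≠ c then k else 0) + 1
      = ∑ k ∈ c.divisors, (if k ≠ c then k else 0) := by
    have : ∑ k ∈ c.divisors, (if k = 1 then 1 else 0)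
        = (if 1 ∈ c.divisors then 1 else 0) := Finset.sum_ite_eq' c.divisors 1 (fun _ => 1)
    rw [if_pos (Nat.one_mem_divisors.mpr hc0)] at this
    rw [← this, ← Finset.sum_add_distrib]
    apply Finset.sum_congr rfl
    intro k hk
    rcases Nat.mem_divisors.mp hk with ⟨hdvd, _⟩
    have hk0 : 0 < k := by
      rcases Nat.eq_zero_or_pos k with rfl | h
      · have := Nat.eq_zero_of_zero_dvd hdvd; omega
      · exact h
    split_ifs <;> omega
  have hlast : ∑ k ∈ c.divisors, (if k ≠ c then k else 0) = ∑ k ∈ c.properDivisors, k := by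
    rw [← Nat.insert_self_properDivisors hc0,
      Finset.sum_insert Nat.self_notMem_properDivisors, if_neg (by simp)]
    rw [Nat.zero_add]
    apply Finset.sum_congr rfl
    intro k hk
    rw [Nat.mem_properDivisors] at hk
    rw [if_pos (by omega)]
  omega

theorem pvProperSum_eq (c : Nat) (hc : 1 ≤ c) :
    pvProperSum c = ∑ k ∈ c.properDivisors, k := by
  unfold pvProperSum
  rcases Nat.lt_or_ge c 2 with h | h
  · have : c = 1 := by omega
    subst this
    simp [Nat.properDivisors_one]
  · rw [if_neg (by omega), pvDivLoopB_invariant c h c 2 1 (by omega)]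
    have := pvPairing c h
    omega

-- per-candidate test equivalence
theorem pvSumEq (c : Nat) (hc : 1 ≤ c) :
    (pvFactorsA (c : Int)).sum = ((pvProperSum c : Nat) : Int) := by
  unfold pvFactorsA
  rw [pvFactorsA_sum_eq c c, sum_range_eq_properDivisors c hc, pvProperSum_eq c hc]

theorem pvTestEquiv (c : Nat) (hc : 1 ≤ c) :
    ((pvFactorsA (c : Int)).sum = (c : Int)) ↔ pvProperSum c = c := by
  rw [pvSumEq c hc]
  exact_mod_cast Int.natCast_inj

-- the two search loops agree step for step
theorem pvLoop_eq (N : Nat) (hN : 1 ≤ N) :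
    ∀ fuel (j : Nat), 1 ≤ j →
      pvLoopA (N : Int) (j : Int) fuel
        = (match pvFindB (N + j) fuel with
           | some cand => ((cand : Int), PySem.Int.toStr (N : Int) ++ " is not a perfect number, but the nearest perfect number is " ++ PySem.Int.toStr (cand : Int))
           | none => (0, "")) := by
  intro fuel
  induction fuel with
  | zero => intro j hj; simp [pvLoopA, pvFindB]
  | succ fuel ih =>
    intro j hj
    show (let candidate := (N : Int) + (j : Int);
          let factors := pvFactorsA candidate;
          if factors.sum = candidate then _ else pvLoopA (N : Int) ((j : Int) + 1) fuel) = _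
    have hcast : (N : Int) + (j : Int) = ((N + j : Nat) : Int) := by push_cast; ring
    simp only [hcast]
    rw [pvFindB]
    by_cases htest : pvProperSum (N + j) = N + j
    · rw [if_pos ((pvTestEquiv (N + j) (by omega)).mpr htest), if_pos htest]
    · rw [if_neg (fun h => htest ((pvTestEquiv (N + j) (by omega)).mp h)),
        if_neg htest]
      have : ((j : Int) + 1) = ((j + 1 : Nat) : Int) := by push_cast; ring
      rw [this, ih (j + 1) (by omega)]
      have : N + j + 1 = N + (j + 1) := by omega
      rw [this]

theorem pvFindB_ge (c : Nat) : ∀ fuel cand, pvFindB c fuel = some cand → c ≤ cand := by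
  intro fuel
  induction fuel generalizing c with
  | zero => intro cand h; simp [pvFindB] at h
  | succ fuel ih =>
    intro cand h
    rw [pvFindB] at h
    by_cases ht : pvProperSum c = c
    · rw [if_pos ht] at h
      injection h with h
      omega
    · rw [if_neg ht] at h
      have := ih (c + 1) cand h
      omega

-- ===== VERDICT (by name: the statement is the Claim_ definition above) =====
theorem calculate_perfect_number_spec : Claim_equal_calculate_perfect_number := by
  intro number hdom hpre
  unfold Spec_calculate_perfect_number
  unfold Pre_calculate_perfect_number at hpre
  have hA : calculate_perfect_number number
      = (if (pvFactorsA number).sum = number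
          then (number, PySem.Int.toStr number ++ " is a perfect number")
          else pvLoopA number 1 pvFuel) := by
    unfold calculate_perfect_number
    rw [if_neg (by omega)]
  have hB : calculate_perfect_number_alt number
      = (match pvFindB number.toNat (pvFuel + 1) with
         | some cand =>
           if cand = number.toNat then (number, PySem.Int.toStr number ++ " is a perfect number")
           else ((cand : Int), PySem.Int.toStr number ++ " is not a perfect number, but the nearest perfect number is " ++ PySem.Int.toStr (cand : Int))
         | none => (0, "")) := by
    unfold calculate_perfect_number_alt
    rw [if_neg (by omega)]
  set N := number.toNat with hNdef
  have hnum : number = (N : Int) := by omega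
  have hN1 : 1 ≤ N := by omega
  rw [hA, hB, hnum]
  by_cases htest : pvProperSum N = N
  · have hfound : pvFindB N (pvFuel + 1) = some N := by
      rw [pvFindB, if_pos htest]
    rw [hfound, if_pos ((pvTestEquiv N hN1).mpr htest)]
    simp
  · have hskip : pvFindB N (pvFuel + 1) = pvFindB (N + 1) pvFuel := by
      rw [pvFindB, if_neg htest]
    rw [hskip, if_neg (fun h => htest ((pvTestEquiv N hN1).mp h))]
    have hone : (1 : Int) = ((1 : Nat) : Int) := by norm_num
    rw [hone, pvLoop_eq N hN1 pvFuel 1 le_rfl]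
    rcases hfind : pvFindB (N + 1) pvFuel with _ | cand
    · rfl
    · have hge : N + 1 ≤ cand := pvFindB_ge (N + 1) pvFuel cand hfind
      have hne : cand ≠ N := by omega
      simp only [if_neg hne]
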